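-- pv_equiv track=rewrite | github.com/MeghPatel327/IITM-GRPAs | week 7/Strings 1.py | is_odd_indices_alpha_and_even_indices_digits
-- ===== SOURCE A (Python) =====
-- def is_odd_indices_alpha_and_even_indices_digits(string: str) -> bool:
--     string = list(string)
--     new_str = ''
--     for char in string[1::2]:
--         new_str += char
--     a = new_str.isalpha()
--     new_str = ''
--     for char in string[::2]:
--         new_str += char
--     b = new_str.isnumeric()
--     return a and b
-- ===== SOURCE B (Python) =====
-- def is_odd_indices_alpha_and_even_indices_digits(string: str) -> bool:
--     # empty / single-char strings: A's whole-slice isalpha()/isnumeric() reject them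
--     if len(string) < 2:
--         return False
--     even = True
--     for char in string:
--         if even:
--             if not char.isdigit():
--                 return False
--         else:
--             if not char.isalpha():
--                 return False
--         even = not even
--     return True
-- ===== Notes on version B (the rewrite author's own statement) =====
-- stated objective: faster
-- what changed: Replaces A's two slice-build-and-test passes (concatenating odd-index and even-index characters into new strings, then whole-string isalpha/isnumeric) with one early-exit pass over the characters toggling a parity flag and checking each character in place; a leading length-<2 guard reproduces the empty-slice rejections.
import Mathlib
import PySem

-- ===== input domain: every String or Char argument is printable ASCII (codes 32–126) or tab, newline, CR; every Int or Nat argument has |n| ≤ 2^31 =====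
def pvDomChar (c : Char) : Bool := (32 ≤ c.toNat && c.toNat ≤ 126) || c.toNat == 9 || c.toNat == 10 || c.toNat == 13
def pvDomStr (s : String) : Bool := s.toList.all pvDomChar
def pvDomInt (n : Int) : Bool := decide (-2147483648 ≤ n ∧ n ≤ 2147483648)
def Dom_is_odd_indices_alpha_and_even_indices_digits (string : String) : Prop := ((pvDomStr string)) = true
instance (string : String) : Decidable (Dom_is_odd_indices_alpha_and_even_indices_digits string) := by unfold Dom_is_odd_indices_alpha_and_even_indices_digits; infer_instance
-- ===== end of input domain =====

-- B replaces A's two slice-build-and-test passes with one early-exit pass toggling a parity flag (simpler, same result).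


-- ===== PORT A =====
-- `isnumeric` is ported as strIsdigit: exact on the ASCII domain Dom_, where isnumeric = isdigit.
def is_odd_indices_alpha_and_even_indices_digits (string : String) : Bool :=
  let cs := string.toList                                   -- string = list(string)
  let new_str1 := ((PySem.List.slice? cs (some 1) none 2).getD []).foldl
      (fun acc c => acc ++ [c]) ([] : List Char)            -- for char in string[1::2]: new_str += char
  let a := PySem.Chars.strIsalpha new_str1                  -- a = new_str.isalpha()
  let new_str2 := ((PySem.List.slice? cs none none 2).getD []).foldl
      (fun acc c => acc ++ [c]) ([] : List Char)            -- for char in string[::2]: new_str += char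
  let b := PySem.Chars.strIsdigit new_str2                  -- b = new_str.isnumeric()
  a && b

-- ===== PORT B =====
-- the early-exit loop of Source B: `even` is the parity flag toggled each step
def pvGoB : Bool → List Char → Bool
  | _, [] => true
  | ev, c :: t =>
    if (if ev then PySem.Chars.isdigit c else PySem.Chars.isalpha c) then pvGoB (!ev) t
    else false

def is_odd_indices_alpha_and_even_indices_digits_alt (string : String) : Bool :=
  let cs := string.toList
  if cs.length < 2 then false
  else pvGoB true cs

-- ===== PRECONDITION & SPEC =====
def Spec_is_odd_indices_alpha_and_even_indices_digits (string : String) (out : Bool) : Prop := out = is_odd_indices_alpha_and_even_indices_digits_alt string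
instance (string : String) (out : Bool) : Decidable (Spec_is_odd_indices_alpha_and_even_indices_digits string out) := by unfold Spec_is_odd_indices_alpha_and_even_indices_digits; infer_instance

-- ===== CLAIM (what is proved, stated in full; the proofs are below) =====
def Claim_equal_is_odd_indices_alpha_and_even_indices_digits : Prop := ∀ (string : String), Dom_is_odd_indices_alpha_and_even_indices_digits string → Spec_is_odd_indices_alpha_and_even_indices_digits string (is_odd_indices_alpha_and_even_indices_digits string)

-- ===== LEMMAS AND PROOFS =====

-- the elements at even indices (0, 2, 4, …); the odd-index elements of cs are pvEvens cs.tail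
def pvEvens {α : Type} : List α → List α
  | [] => []
  | [x] => [x]
  | x :: _ :: t => x :: pvEvens t

-- the step-2 slices of A, characterised
lemma pv_filterMap_evens {α : Type} : ∀ (cs : List α),
    List.filterMap (fun k => cs[2 * k]?) (List.range ((cs.length + 1) / 2)) = pvEvens cs := by
  intro cs
  induction cs using pvEvens.induct with
  | case1 => simp [pvEvens]
  | case2 x => simp [pvEvens, List.range_succ, List.filterMap]
  | case3 x y t ih =>
    have hlen : ((x :: y :: t).length + 1) / 2 = (t.length + 1) / 2 + 1 := by
      simp [List.length_cons]; omega
    rw [hlen, List.range_succ_eq_map, List.filterMap_cons, List.filterMap_map]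
    simp only [Nat.mul_zero, List.getElem?_cons_zero, Function.comp]
    have harg : ∀ k : Nat, (x :: y :: t)[2 * (k + 1)]? = t[2 * k]? := by
      intro k
      have : 2 * (k + 1) = 2 * k + 1 + 1 := by omega
      rw [this]; simp
    simp only [harg]
    rw [ih]
    rfl

lemma pv_slice_even (cs : List Char) :
    PySem.List.slice? cs none none 2 = some (pvEvens cs) := by
  simp only [PySem.List.slice?, PySem.List.sliceIndices]
  norm_num
  have hc : (if 0 < cs.length then (((cs.length : Int) + 2 - 1) / 2).toNat else 0)
      = (cs.length + 1) / 2 := by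
    split <;> omega
  rw [hc]
  have h2 : ∀ k : Nat, ((2:Int) * (k:Int)).toNat = 2 * k := by intro k; omega
  simp only [h2]
  exact pv_filterMap_evens cs

lemma pv_slice_odd (cs : List Char) :
    PySem.List.slice? cs (some 1) none 2 = some (pvEvens cs.tail) := by
  simp only [PySem.List.slice?, PySem.List.sliceIndices]
  norm_num
  rcases cs with _ | ⟨x, t⟩
  · simp [pvEvens]
  · have hmin : min (1:Int) ((x :: t).length : Int) = 1 := by simp only [List.length_cons]; push_cast; omega
    rw [hmin]
    have hc : (if 1 < (x :: t).length then ((((x :: t).length : Int) - 1 + 2 - 1) / 2).toNat else 0)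
        = (t.length + 1) / 2 := by
      simp only [List.length_cons]; split <;> push_cast <;> omega
    rw [hc]
    have harg : ∀ k : Nat, (x :: t)[((1:Int) + 2 * (k:Int)).toNat]? = t[2 * k]? := by
      intro k
      have : ((1:Int) + 2 * (k:Int)).toNat = 2 * k + 1 := by omega
      rw [this]; simp
    simp only [harg, List.tail_cons]
    rw [pv_filterMap_evens t]

-- the accumulating `new_str += char` loop just rebuilds the list
lemma pv_foldl_id (l : List Char) : l.foldl (fun acc c => acc ++ [c]) ([] : List Char) = l := by
  simpa using PySem.List.foldl_append_singleton l []

lemma pvEvens_cons_tail {α : Type} (y : α) (t : List α) :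
    pvEvens (y :: t) = y :: pvEvens t.tail := by
  rcases t with _ | ⟨z, u⟩ <;> rfl

-- B's loop, characterised by the two parity sublists
lemma pvGoB_eq : ∀ (cs : List Char) (ev : Bool),
    pvGoB ev cs =
      ((pvEvens cs).all (fun c => if ev then PySem.Chars.isdigit c else PySem.Chars.isalpha c) &&
       (pvEvens cs.tail).all (fun c => if ev then PySem.Chars.isalpha c else PySem.Chars.isdigit c)) := by
  intro cs
  induction cs using pvEvens.induct with
  | case1 => intro ev; simp [pvGoB, pvEvens]
  | case2 x => intro ev; cases ev <;> simp [pvGoB, pvEvens]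
  | case3 x y t ih =>
    intro ev
    have h1 : pvEvens (x :: y :: t) = x :: pvEvens t := rfl
    simp only [pvGoB, Bool.not_not, h1, List.tail_cons, pvEvens_cons_tail y t,
      List.all_cons, ih ev]
    cases ev <;>
      simp only [if_true, Bool.not_true, Bool.not_false] <;>
      cases hx : PySem.Chars.isdigit x <;> cases hax : PySem.Chars.isalpha x <;>
      cases hy : PySem.Chars.isdigit y <;> cases hay : PySem.Chars.isalpha y <;>
      simp [Bool.and_comm]

lemma pvEvens_ne_nil {α : Type} (x : α) (t : List α) : pvEvens (x :: t) ≠ [] := by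
  rcases t with _ | ⟨y, u⟩ <;> simp [pvEvens]

-- ===== VERDICT (by name: the statement is the Claim_ definition above) =====
theorem is_odd_indices_alpha_and_even_indices_digits_spec : Claim_equal_is_odd_indices_alpha_and_even_indices_digits := by
  intro string _
  unfold Spec_is_odd_indices_alpha_and_even_indices_digits
  unfold is_odd_indices_alpha_and_even_indices_digits is_odd_indices_alpha_and_even_indices_digits_alt
  simp only [pv_slice_even, pv_slice_odd, Option.getD_some, pv_foldl_id]
  rcases hcs : string.toList with _ | ⟨x, t⟩
  · simp [pvEvens, PySem.Chars.strIsalpha, PySem.Chars.strIsdigit]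
  · rcases t with _ | ⟨y, u⟩
    · simp [pvEvens, PySem.Chars.strIsalpha, PySem.Chars.strIsdigit]
    · have hlen : ¬ (x :: y :: u).length < 2 := by simp
      simp only [List.tail_cons, if_neg hlen, pvGoB_eq]
      simp only [PySem.Chars.strIsalpha, PySem.Chars.strIsdigit]
      have h1 : pvEvens (x :: y :: u) ≠ [] := pvEvens_ne_nil x (y :: u)
      have h2 : pvEvens (y :: u) ≠ [] := pvEvens_ne_nil y u
      cases hA : (pvEvens (x :: y :: u)).all PySem.Chars.isdigit <;>
        cases hB : (pvEvens (y :: u)).all PySem.Chars.isalpha <;>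
        simp [h1, h2, hA, hB]
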